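-- pv_equiv track=rewrite | github.com/devz0r/job-hunter | matching/gap_analysis.py | _classify_requirement_context
-- ===== SOURCE A (Python) =====
-- def _classify_requirement_context(text: str, keyword: str) -> str:
--     """
--     Determine if a keyword appears in a 'required' or 'preferred' context.
--     Looks backwards from the keyword for the nearest section header.
--     Returns 'required', 'preferred', or 'unknown'.
--     """
--     text_lower = text.lower()
--     keyword_pos = text_lower.find(keyword.lower())
--     if keyword_pos == -1:
--         return "unknown"
--
--     # Check the last 500 chars before the keyword for section headers
--     preceding = text_lower[max(0, keyword_pos - 500):keyword_pos]
--
--     preferred_headers = [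
--         "preferred qualifications", "preferred skills", "preferred experience",
--         "nice to have", "nice-to-have", "desired qualifications",
--         "desired skills", "bonus qualifications", "bonus skills",
--         "preferred:", "plus:", "a plus", "advantageous",
--         "ideally", "not required but", "strongly preferred",
--     ]
--     required_headers = [
--         "required qualifications", "required skills", "required experience",
--         "minimum qualifications", "must have", "must-have",
--         "requirements:", "required:", "essential",
--         "minimum requirements", "basic qualifications",
--         "what you need", "what we require", "qualifications:",
--         "what you'll need", "what you bring",
--     ]
--
--     last_pref_pos = max((preceding.rfind(h) for h in preferred_headers), default=-1)
--     last_req_pos = max((preceding.rfind(h) for h in required_headers), default=-1)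
--
--     if last_pref_pos > last_req_pos:
--         return "preferred"
--     elif last_req_pos > last_pref_pos:
--         return "required"
--     return "unknown"
-- ===== SOURCE B (Python) =====
-- PREFERRED_HEADERS = [
--     "preferred qualifications", "preferred skills", "preferred experience",
--     "nice to have", "nice-to-have", "desired qualifications",
--     "desired skills", "bonus qualifications", "bonus skills",
--     "preferred:", "plus:", "a plus", "advantageous",
--     "ideally", "not required but", "strongly preferred",
-- ]
-- REQUIRED_HEADERS = [
--     "required qualifications", "required skills", "required experience",
--     "minimum qualifications", "must have", "must-have",
--     "requirements:", "required:", "essential",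
--     "minimum requirements", "basic qualifications",
--     "what you need", "what we require", "qualifications:",
--     "what you'll need", "what you bring",
-- ]
--
--
-- def _classify_requirement_context(text: str, keyword: str) -> str:
--     """Backward positional sweep: walk the window right-to-left and stop at the
--     first position where some header starts; its group is the answer (both
--     groups starting at the very same position is ambiguous -> 'unknown').
--     No rfind and no max computations at all."""
--     text_lower = text.lower()
--     keyword_pos = text_lower.find(keyword.lower())
--     if keyword_pos == -1:
--         return "unknown"
--     preceding = text_lower[max(0, keyword_pos - 500):keyword_pos]
--
--     for i in range(len(preceding) - 1, -1, -1):
--         pref_here = any(preceding.startswith(h, i) for h in PREFERRED_HEADERS)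
--         req_here = any(preceding.startswith(h, i) for h in REQUIRED_HEADERS)
--         if pref_here and req_here:
--             return "unknown"
--         if pref_here:
--             return "preferred"
--         if req_here:
--             return "required"
--     return "unknown"
-- ===== Notes on version B (the rewrite author's own statement) =====
-- stated objective: alternative
-- what changed: Replaces the two max-over-rfind computations and three-way comparison by a single right-to-left positional sweep of the 500-char window that stops at the first position where any header starts and returns that header's group (tie at the same position -> unknown); no rfind and no max are computed.
import Mathlib
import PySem

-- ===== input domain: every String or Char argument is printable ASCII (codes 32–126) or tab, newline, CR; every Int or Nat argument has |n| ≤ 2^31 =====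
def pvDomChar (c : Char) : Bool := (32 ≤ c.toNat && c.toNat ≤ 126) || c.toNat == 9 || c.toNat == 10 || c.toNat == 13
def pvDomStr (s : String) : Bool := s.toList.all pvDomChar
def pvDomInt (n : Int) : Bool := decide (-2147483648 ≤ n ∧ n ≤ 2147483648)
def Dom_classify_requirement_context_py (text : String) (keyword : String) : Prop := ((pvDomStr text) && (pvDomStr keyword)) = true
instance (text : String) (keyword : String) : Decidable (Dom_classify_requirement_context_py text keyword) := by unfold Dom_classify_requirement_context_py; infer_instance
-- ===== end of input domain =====

-- B replaces A's two max-over-rfind passes and three-way comparison by a backward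
-- positional sweep of the window that stops at the first position where any header
-- starts (same worst-case cost; objective: alternative).


-- ===== PORT A =====
-- shared literal header lists (the same literals appear in both Pythons)
def pvPrefHeaders : List String :=
  ["preferred qualifications", "preferred skills", "preferred experience",
   "nice to have", "nice-to-have", "desired qualifications",
   "desired skills", "bonus qualifications", "bonus skills",
   "preferred:", "plus:", "a plus", "advantageous",
   "ideally", "not required but", "strongly preferred"]

def pvReqHeaders : List String :=
  ["required qualifications", "required skills", "required experience",
   "minimum qualifications", "must have", "must-have",
   "requirements:", "required:", "essential",
   "minimum requirements", "basic qualifications",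
   "what you need", "what we require", "qualifications:",
   "what you'll need", "what you bring"]

def classify_requirement_context_py (text : String) (keyword : String) : String :=
  let text_lower := PySem.Str.lower text
  let keyword_pos := PySem.Str.find text_lower (PySem.Str.lower keyword)
  if keyword_pos == -1 then "unknown"
  else
    let preceding := PySem.Str.slice text_lower (some (max 0 (keyword_pos - 500))) (some keyword_pos)
    let last_pref_pos := PySem.List.maxD (pvPrefHeaders.map (fun h => PySem.Str.rfind preceding h)) id (-1)
    let last_req_pos := PySem.List.maxD (pvReqHeaders.map (fun h => PySem.Str.rfind preceding h)) id (-1)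
    if last_pref_pos > last_req_pos then "preferred"
    else if last_req_pos > last_pref_pos then "required"
    else "unknown"

-- ===== PORT B =====
-- the `for i in range(len(preceding)-1, -1, -1)` loop with its early returns; the
-- argument n is "number of positions still to inspect", so position i = n-1 is next.
-- Python's preceding.startswith(h, i) is exact as `startswith (prec.drop i) h` for 0 ≤ i.
def pvScan (prec : List Char) : Nat → String
  | 0 => "unknown"
  | i + 1 =>
    let pref_here := pvPrefHeaders.any (fun h => PySem.Chars.startswith (prec.drop i) h.toList)
    let req_here := pvReqHeaders.any (fun h => PySem.Chars.startswith (prec.drop i) h.toList)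
    if pref_here && req_here then "unknown"
    else if pref_here then "preferred"
    else if req_here then "required"
    else pvScan prec i

def classify_requirement_context_py_alt (text : String) (keyword : String) : String :=
  let text_lower := PySem.Str.lower text
  let keyword_pos := PySem.Str.find text_lower (PySem.Str.lower keyword)
  if keyword_pos == -1 then "unknown"
  else
    let preceding := PySem.Str.slice text_lower (some (max 0 (keyword_pos - 500))) (some keyword_pos)
    pvScan preceding.toList preceding.toList.length

-- ===== PRECONDITION & SPEC =====
def Spec_classify_requirement_context_py (text : String) (keyword : String) (out : String) : Prop := out = classify_requirement_context_py_alt text keyword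
instance (text : String) (keyword : String) (out : String) : Decidable (Spec_classify_requirement_context_py text keyword out) := by unfold Spec_classify_requirement_context_py; infer_instance

-- ===== CLAIM (what is proved, stated in full; the proofs are below) =====
def Claim_equal_classify_requirement_context_py : Prop := ∀ (text : String) (keyword : String), Dom_classify_requirement_context_py text keyword → Spec_classify_requirement_context_py text keyword (classify_requirement_context_py text keyword)

-- ===== LEMMAS AND PROOFS =====

-- A's three-way comparison as a function of the two group maxima
def pvCmp (p r : Int) : String :=
  if r < p then "preferred" else if p < r then "required" else "unknown"

-- the greatest start position ≤ i of any header of hs in prec, -1 if none (via rfind.go)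
def pvGM (prec : List Char) (hs : List String) (i : Nat) : Int :=
  (hs.map (fun h => PySem.Chars.rfind.go prec h.toList i)).foldl max (-1)

-- the greatest start position < n (so: what the scan with n positions left has not yet ruled out)
def pvGMB (prec : List Char) (hs : List String) : Nat → Int
  | 0 => -1
  | i + 1 => pvGM prec hs i

theorem pv_go_ge (s sub : List Char) : ∀ n, (-1 : Int) ≤ PySem.Chars.rfind.go s sub n := by
  intro n
  induction n with
  | zero => rw [PySem.Chars.rfind.go]; split <;> omega
  | succ j ih =>
    rw [PySem.Chars.rfind.go]
    split
    · omega
    · exact ih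

theorem pv_go_le (s sub : List Char) : ∀ n, PySem.Chars.rfind.go s sub n ≤ (n : Int) := by
  intro n
  induction n with
  | zero => rw [PySem.Chars.rfind.go]; split <;> omega
  | succ j ih =>
    rw [PySem.Chars.rfind.go]
    split
    · omega
    · have := ih; push_cast; omega

theorem pv_go_hit (s sub : List Char) (n : Nat) (h : sub.isPrefixOf (s.drop n) = true) :
    PySem.Chars.rfind.go s sub n = (n : Int) := by
  cases n with
  | zero => rw [PySem.Chars.rfind.go]; simp at h; simp [h]
  | succ j => rw [PySem.Chars.rfind.go]; simp [h]

theorem pv_go_miss_succ (s sub : List Char) (j : Nat) (h : sub.isPrefixOf (s.drop (j + 1)) = false) :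
    PySem.Chars.rfind.go s sub (j + 1) = PySem.Chars.rfind.go s sub j := by
  rw [PySem.Chars.rfind.go]; simp [h]

theorem pv_go_miss_zero (s sub : List Char) (h : sub.isPrefixOf s = false) :
    PySem.Chars.rfind.go s sub 0 = -1 := by
  rw [PySem.Chars.rfind.go]; simp [h]

theorem pv_foldl_max_le (m : Int) : ∀ (xs : List Int) (a : Int), a ≤ m → (∀ x ∈ xs, x ≤ m) →
    xs.foldl max a ≤ m := by
  intro xs
  induction xs with
  | nil => intro a ha _; simpa using ha
  | cons x t ih =>
    intro a ha hall
    rw [List.foldl_cons]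
    exact ih (max a x) (max_le ha (hall x (by simp))) (fun y hy => hall y (by simp [hy]))

-- each group maximum is below its position bound + 1
theorem pvGM_le (prec : List Char) (hs : List String) (i : Nat) : pvGM prec hs i ≤ (i : Int) := by
  apply pv_foldl_max_le
  · omega
  · intro x hx
    obtain ⟨h, _, rfl⟩ := List.mem_map.mp hx
    exact pv_go_le _ _ _

theorem pvGMB_lt (prec : List Char) (hs : List String) (n : Nat) : pvGMB prec hs n < (n : Int) := by
  cases n with
  | zero => simp [pvGMB]
  | succ i =>
    have := pvGM_le prec hs i
    simp only [pvGMB]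
    push_cast
    omega

-- a header starts at position i: the group maximum over positions ≤ i is exactly i
theorem pvGM_hit (prec : List Char) (hs : List String) (i : Nat)
    (h : hs.any (fun h => PySem.Chars.startswith (prec.drop i) h.toList) = true) :
    pvGM prec hs i = (i : Int) := by
  obtain ⟨g, hg, hpre⟩ := List.any_eq_true.mp h
  have hmem : ((i : Int)) ∈ hs.map (fun h => PySem.Chars.rfind.go prec h.toList i) := by
    refine List.mem_map.mpr ⟨g, hg, ?_⟩
    exact pv_go_hit _ _ _ hpre
  have h1 : (i : Int) ≤ pvGM prec hs i := (PySem.List.le_foldl_max _ (-1)).2 _ hmem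
  have h2 := pvGM_le prec hs i
  omega

-- no header of hs starts at any position ≥ i (e.g. because any-at-i is false and i = n,
-- or because drop i is too short): the maximum over ≤ i collapses to the one over < i
theorem pvGM_miss (prec : List Char) (hs : List String) (i : Nat)
    (h : ∀ g ∈ hs, g.toList.isPrefixOf (prec.drop i) = false) :
    pvGM prec hs i = pvGMB prec hs i := by
  cases i with
  | zero =>
    have hmap : hs.map (fun g => PySem.Chars.rfind.go prec g.toList 0) = hs.map (fun _ => (-1 : Int)) := by
      apply List.map_congr_left
      intro g hg
      exact pv_go_miss_zero _ _ (by simpa using h g hg)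
    simp only [pvGM, pvGMB, hmap]
    have hle : (hs.map (fun _ => (-1 : Int))).foldl max (-1) ≤ -1 := by
      apply pv_foldl_max_le
      · exact le_rfl
      · intro x hx
        obtain ⟨_, _, rfl⟩ := List.mem_map.mp hx
        exact le_rfl
    have hge := (PySem.List.le_foldl_max (hs.map (fun _ => (-1 : Int))) (-1)).1
    omega
  | succ j =>
    simp only [pvGM, pvGMB]
    congr 1
    apply List.map_congr_left
    intro g hg
    exact pv_go_miss_succ _ _ _ (h g hg)

theorem pv_any_false {prec : List Char} {hs : List String} {i : Nat}
    (h : hs.any (fun h => PySem.Chars.startswith (prec.drop i) h.toList) = false) :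
    ∀ g ∈ hs, g.toList.isPrefixOf (prec.drop i) = false := by
  intro g hg
  have := List.any_eq_false.mp h g hg
  exact Bool.eq_false_iff.mpr fun hc => this hc

-- the core invariant: the backward sweep with n positions left computes A's
-- three-way comparison of the two group maxima over positions < n
theorem pvScan_eq (prec : List Char) : ∀ n : Nat,
    pvScan prec n = pvCmp (pvGMB prec pvPrefHeaders n) (pvGMB prec pvReqHeaders n) := by
  intro n
  induction n with
  | zero => simp [pvScan, pvGMB, pvCmp]
  | succ i ih =>
    by_cases hp : pvPrefHeaders.any (fun h => PySem.Chars.startswith (prec.drop i) h.toList) = true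
    · by_cases hr : pvReqHeaders.any (fun h => PySem.Chars.startswith (prec.drop i) h.toList) = true
      · -- both groups start here: tie at position i
        have h1 : pvGMB prec pvPrefHeaders (i + 1) = (i : Int) := pvGM_hit prec pvPrefHeaders i hp
        have h2 : pvGMB prec pvReqHeaders (i + 1) = (i : Int) := pvGM_hit prec pvReqHeaders i hr
        rw [h1, h2]
        simp [pvScan, hp, hr, pvCmp]
      · -- only a preferred header starts here
        have hr' := eq_false_of_ne_true hr
        have h1 : pvGMB prec pvPrefHeaders (i + 1) = (i : Int) := pvGM_hit prec pvPrefHeaders i hp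
        have h2 : pvGMB prec pvReqHeaders (i + 1) = pvGMB prec pvReqHeaders i :=
          pvGM_miss prec pvReqHeaders i (pv_any_false hr')
        have h3 : pvGMB prec pvReqHeaders i < (i : Int) := pvGMB_lt prec pvReqHeaders i
        rw [h1, h2]
        simp [pvScan, hp, hr', pvCmp, h3]
    · have hp' := eq_false_of_ne_true hp
      by_cases hr : pvReqHeaders.any (fun h => PySem.Chars.startswith (prec.drop i) h.toList) = true
      · -- only a required header starts here
        have h1 : pvGMB prec pvPrefHeaders (i + 1) = pvGMB prec pvPrefHeaders i :=
          pvGM_miss prec pvPrefHeaders i (pv_any_false hp')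
        have h2 : pvGMB prec pvReqHeaders (i + 1) = (i : Int) := pvGM_hit prec pvReqHeaders i hr
        have h3 : pvGMB prec pvPrefHeaders i < (i : Int) := pvGMB_lt prec pvPrefHeaders i
        have h4 : ¬ ((i : Int) < pvGMB prec pvPrefHeaders i) := by omega
        rw [h1, h2]
        simp [pvScan, hp', hr, pvCmp, h3, h4]
      · -- nothing starts here: recurse
        have hr' := eq_false_of_ne_true hr
        have h1 : pvGMB prec pvPrefHeaders (i + 1) = pvGMB prec pvPrefHeaders i :=
          pvGM_miss prec pvPrefHeaders i (pv_any_false hp')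
        have h2 : pvGMB prec pvReqHeaders (i + 1) = pvGMB prec pvReqHeaders i :=
          pvGM_miss prec pvReqHeaders i (pv_any_false hr')
        rw [h1, h2, ← ih]
        simp [pvScan, hp', hr']

-- every header is a nonempty string
theorem pvPref_ne : ∀ h ∈ pvPrefHeaders, h.toList ≠ [] := by decide
theorem pvReq_ne : ∀ h ∈ pvReqHeaders, h.toList ≠ [] := by decide

-- Python's max over a nonempty Int list is the foldl of max
theorem pv_max?_aux : ∀ (t : List Int) (m : Int), PySem.List.max? (m :: t) id = some (t.foldl max m) := by
  intro t
  induction t with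
  | nil => intro m; rfl
  | cons a t ih =>
    intro m
    have h1 : PySem.List.max? (m :: a :: t) id = PySem.List.max? (max m a :: t) id := by
      simp only [PySem.List.max?, List.foldl_cons]
      congr 1
      show (if id m < id a then some a else some m) = some (max m a)
      simp only [id_eq]
      split_ifs with hlt
      · rw [max_eq_right hlt.le]
      · rw [max_eq_left (not_lt.mp hlt)]
    rw [h1, ih (max m a), List.foldl_cons]

theorem pv_maxD_eq_foldl (xs : List Int) (hne : xs ≠ [])
    (hall : ∀ x ∈ xs, (-1 : Int) ≤ x) :
    PySem.List.maxD xs id (-1) = xs.foldl max (-1) := by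
  match xs, hne with
  | a :: t, _ =>
    have ha : (-1 : Int) ≤ a := hall a (by simp)
    rw [PySem.List.maxD, pv_max?_aux, Option.getD_some, List.foldl_cons, max_eq_right ha]

-- A's group maximum via rfind equals pvGMB taken at the full window length
theorem pv_A_max (prec : String) (hs : List String) (hne : ∀ h ∈ hs, h.toList ≠ []) (h0 : hs ≠ []) :
    PySem.List.maxD (hs.map (fun h => PySem.Str.rfind prec h)) id (-1)
      = pvGMB prec.toList hs prec.toList.length := by
  rw [pv_maxD_eq_foldl]
  · have hmap : hs.map (fun h => PySem.Str.rfind prec h)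
        = hs.map (fun h => PySem.Chars.rfind.go prec.toList h.toList prec.toList.length) := by
      apply List.map_congr_left
      intro g _
      rw [PySem.Str.rfind_eq, PySem.Chars.rfind]
    rw [hmap]
    show pvGM prec.toList hs prec.toList.length = _
    apply pvGM_miss
    intro g hg
    have : prec.toList.drop prec.toList.length = [] := by simp
    rw [this]
    cases hgl : g.toList with
    | nil => exact absurd hgl (hne g hg)
    | cons a t => rfl
  · simpa using h0
  · intro x hx
    obtain ⟨g, _, rfl⟩ := List.mem_map.mp hx
    rw [PySem.Str.rfind_eq, PySem.Chars.rfind]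
    exact pv_go_ge _ _ _

theorem classify_equal (text keyword : String) :
    classify_requirement_context_py text keyword = classify_requirement_context_py_alt text keyword := by
  simp only [classify_requirement_context_py, classify_requirement_context_py_alt]
  by_cases hk : (PySem.Str.find (PySem.Str.lower text) (PySem.Str.lower keyword) == -1) = true
  · rw [if_pos hk, if_pos hk]
  · rw [if_neg hk, if_neg hk]
    set prec := PySem.Str.slice (PySem.Str.lower text)
      (some (max 0 (PySem.Str.find (PySem.Str.lower text) (PySem.Str.lower keyword) - 500)))
      (some (PySem.Str.find (PySem.Str.lower text) (PySem.Str.lower keyword))) with hprec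
    rw [pvScan_eq, pv_A_max prec pvPrefHeaders pvPref_ne (by simp [pvPrefHeaders]),
        pv_A_max prec pvReqHeaders pvReq_ne (by simp [pvReqHeaders])]
    simp [pvCmp]

-- ===== VERDICT (by name: the statement is the Claim_ definition above) =====
theorem classify_requirement_context_py_spec : Claim_equal_classify_requirement_context_py := by
  intro text keyword _
  unfold Spec_classify_requirement_context_py
  exact classify_equal text keyword
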